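-- pv_equiv track=rewrite | github.com/mailpile/Mailpile | mailpile/jinjaextensions.py | _trim_blanks
-- ===== SOURCE A (Python) =====
-- def _trim_blanks(text):
--
--     # Split the lines
--     lines = text.splitlines()
--     collect = []
--     count = 0
--
--     # Strart pruning off empty lines at end but leave others
--     for line in reversed(lines):
--         if line:
--             collect.append(line)
--             count += 1
--         elif line == '' and count:
--             collect.append(line)
--
--     output = ''
--     line_count = 0
--     total_lines = len(collect)
--
--     # Re-ouput everything as string with line breaks
--     for line in reversed(collect):
--         line_count += 1
--         if line_count == total_lines:
--             output += line
--         else: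
--             output += line + '\n'
--
--     return output
-- ===== SOURCE B (Python) =====
-- def _trim_blanks(text):
--     # Forward scan: remember the index just past the last non-empty line,
--     # then join that prefix in one library call.
--     lines = text.splitlines()
--     end = 0
--     for i, line in enumerate(lines):
--         if line:
--             end = i + 1
--     return '\n'.join(lines[:end])
-- ===== Notes on version B (the rewrite author's own statement) =====
-- stated objective: simpler
-- what changed: Replaces A's two reversed passes with collect/count bookkeeping and a manual counter-driven join by one forward scan recording the index past the last non-empty line, followed by a slice and a single newline-join library call.
import Mathlib
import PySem

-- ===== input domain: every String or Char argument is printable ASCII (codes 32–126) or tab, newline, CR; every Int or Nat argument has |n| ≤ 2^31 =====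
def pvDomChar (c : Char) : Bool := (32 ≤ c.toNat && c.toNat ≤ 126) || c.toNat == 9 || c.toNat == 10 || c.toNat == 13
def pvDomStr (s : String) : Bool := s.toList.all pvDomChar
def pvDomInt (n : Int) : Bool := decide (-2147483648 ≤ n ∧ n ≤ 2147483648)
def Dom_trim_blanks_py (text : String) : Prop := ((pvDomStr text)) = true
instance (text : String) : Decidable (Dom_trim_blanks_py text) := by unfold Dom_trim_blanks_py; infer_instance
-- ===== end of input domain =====

-- B replaces A's two reversed passes (collect/count, then a counter-driven manual join)
-- by one forward scan for the index past the last non-empty line, a slice and one join (objective: simpler).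

-- ===== PORT A =====
-- first loop body: over reversed(lines), keep non-empty lines; keep '' only once count > 0
def trimAStep (st : List String × Int) (line : String) : List String × Int :=
  if line ≠ "" then (st.1 ++ [line], st.2 + 1)
  else if line = "" ∧ st.2 ≠ 0 then (st.1 ++ [line], st.2)
  else st

-- second loop body: append line, with '\n' except on the last line (line_count == total_lines)
def trimAOut (total : Int) (st : String × Int) (line : String) : String × Int :=
  let lc := st.2 + 1
  if lc = total then (st.1 ++ line, lc) else (st.1 ++ line ++ "\n", lc)

def trim_blanks_py (text : String) : String :=
  let lines := PySem.Str.splitlines text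
  let cc := lines.reverse.foldl trimAStep ([], 0)
  let collect := cc.1
  let total : Int := collect.length
  (collect.reverse.foldl (trimAOut total) ("", 0)).1

-- ===== PORT B =====
def trim_blanks_py_alt (text : String) : String :=
  let lines := PySem.Str.splitlines text
  let e : Int := (PySem.List.enumerate lines).foldl
    (fun e p => if p.2 ≠ "" then p.1 + 1 else e) 0
  PySem.Str.join "\n" (PySem.List.slice lines none (some e))

-- ===== PRECONDITION & SPEC =====
def Spec_trim_blanks_py (text : String) (out : String) : Prop := out = trim_blanks_py_alt text
instance (text : String) (out : String) : Decidable (Spec_trim_blanks_py text out) := by unfold Spec_trim_blanks_py; infer_instance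

-- ===== CLAIM (what is proved, stated in full; the proofs are below) =====
def Claim_equal_trim_blanks_py : Prop := ∀ (text : String), Dom_trim_blanks_py text → Spec_trim_blanks_py text (trim_blanks_py text)

-- ===== LEMMAS AND PROOFS =====

-- the trimmed line list both programs produce: lines with trailing "" lines removed
def pvTrim (l : List String) : List String := (l.reverse.dropWhile (· == "")).reverse

-- A's join, written structurally
def pvJoinN : List String → String
  | [] => ""
  | [x] => x
  | x :: y :: ys => x ++ "\n" ++ pvJoinN (y :: ys)

theorem pvTrim_append_ne (l : List String) (x : String) (hx : x ≠ "") :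
    pvTrim (l ++ [x]) = l ++ [x] := by
  simp [pvTrim, hx]

theorem pvTrim_append_empty (l : List String) :
    pvTrim (l ++ [""]) = pvTrim l := by
  simp [pvTrim]

-- first fold, once a non-empty line has been collected: everything is appended
theorem foldA_started (l : List String) (c : List String) (k : Int) (hk : 0 < k) :
    (l.foldl trimAStep (c, k)).1 = c ++ l ∧ 0 < (l.foldl trimAStep (c, k)).2 := by
  induction l generalizing c k with
  | nil => simpa using hk
  | cons x xs ih =>
    by_cases hx : x = ""
    · subst hx
      have hstep : trimAStep (c, 0 + k) "" = (c ++ [""], 0 + k) := by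
        simp [trimAStep]; omega
      have hstep' : trimAStep (c, k) "" = (c ++ [""], k) := by
        simpa using hstep
      rw [List.foldl_cons, hstep']
      simpa using ih (c ++ [""]) k hk
    · simp only [List.foldl_cons, trimAStep, if_pos hx]
      simpa using ih (c ++ [x]) (k + 1) (by omega)

-- first fold from the initial state: collect = dropWhile (== "")
theorem foldA_init (l : List String) :
    (l.foldl trimAStep ([], 0)).1 = l.dropWhile (· == "") := by
  induction l with
  | nil => rfl
  | cons x xs ih =>
    by_cases hx : x = ""
    · subst hx
      simpa [List.foldl_cons, trimAStep, List.dropWhile_cons] using ih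
    · simp only [List.foldl_cons, trimAStep, if_pos hx, List.dropWhile_cons]
      have := (foldA_started xs [x] 1 (by omega)).1
      simpa [hx] using this

-- second fold: the counter-driven join is pvJoinN
theorem foldA_out (m : List String) (out : String) (j total : Int)
    (h : total = j + m.length) :
    (m.foldl (trimAOut total) (out, j)).1 = out ++ pvJoinN m := by
  induction m generalizing out j with
  | nil => simp [pvJoinN]
  | cons x xs ih =>
    cases xs with
    | nil =>
      have : j + 1 = total := by simp at h; omega
      simp [trimAOut, this, pvJoinN]
    | cons y ys =>
      have hne : ¬ (j + 1 = total) := by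
        simp only [List.length_cons] at h; push_cast at h; omega
      rw [List.foldl_cons]
      have hstep : trimAOut total (out, j) x = (out ++ x ++ "\n", j + 1) := by
        simp [trimAOut, hne]
      rw [hstep, ih (out ++ x ++ "\n") (j + 1) (by simp at h ⊢; omega)]
      simp [pvJoinN, String.append_assoc]

-- pvJoinN is '\n'.join
theorem pvJoinN_eq_join (m : List String) : pvJoinN m = PySem.Str.join "\n" m := by
  induction m with
  | nil => rfl
  | cons x xs ih =>
    cases xs with
    | nil =>
      rw [← String.toList_inj]
      simp [pvJoinN, PySem.Str.toList_join, PySem.Chars.join_singleton]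
    | cons y ys =>
      rw [← String.toList_inj] at ih ⊢
      simp only [pvJoinN, String.toList_append, PySem.Str.toList_join, List.map_cons,
        PySem.Chars.join_cons_cons] at ih ⊢
      simp [ih]

-- PySem.List.enumerate over a snoc
theorem enum_append {α : Type} (l : List α) (x : α) (s : Int) :
    PySem.List.enumerate (l ++ [x]) s = PySem.List.enumerate l s ++ [((s + l.length : Int), x)] := by
  induction l generalizing s with
  | nil => simp [PySem.List.enumerate]
  | cons y ys ih =>
    simp only [List.cons_append, PySem.List.enumerate, ih, List.length_cons]
    push_cast
    ring_nf

-- B's forward scan computes the length of the trimmed list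
theorem foldB_eq (l : List String) :
    ((PySem.List.enumerate l).foldl (fun e p => if p.2 ≠ "" then p.1 + 1 else e) 0)
      = ((pvTrim l).length : Int) := by
  induction l using List.reverseRecOn with
  | nil => rfl
  | append_singleton xs x ih =>
    rw [enum_append, List.foldl_append]
    by_cases hx : x = ""
    · subst hx
      simpa [pvTrim_append_empty] using ih
    · simp [hx, pvTrim_append_ne xs x hx]

-- lines = pvTrim lines ++ (all-empty tail), so taking (pvTrim lines).length recovers pvTrim
theorem take_trim (l : List String) : l.take (pvTrim l).length = pvTrim l := by
  have hsplit : l = pvTrim l ++ (l.reverse.takeWhile (· == "")).reverse := by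
    calc l = l.reverse.reverse := (l.reverse_reverse).symm
    _ = (l.reverse.takeWhile (· == "") ++ l.reverse.dropWhile (· == "")).reverse := by
        rw [List.takeWhile_append_dropWhile]
    _ = pvTrim l ++ (l.reverse.takeWhile (· == "")).reverse := by
        rw [List.reverse_append]; rfl
  nth_rewrite 2 [hsplit]
  exact List.take_left

theorem trim_main (text : String) : trim_blanks_py text = trim_blanks_py_alt text := by
  unfold trim_blanks_py trim_blanks_py_alt
  set lines := PySem.Str.splitlines text with hl
  simp only []
  have h1 : (lines.reverse.foldl trimAStep ([], 0)).1 = (pvTrim lines).reverse := by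
    rw [foldA_init]; simp [pvTrim]
  rw [h1, foldB_eq]
  rw [PySem.List.slice_to lines (by positivity), Int.toNat_natCast, take_trim]
  rw [foldA_out _ "" 0 _ (by simp), List.reverse_reverse]
  rw [pvJoinN_eq_join]
  simp

-- ===== VERDICT (by name: the statement is the Claim_ definition above) =====
theorem trim_blanks_py_spec : Claim_equal_trim_blanks_py := by
  intro text _
  unfold Spec_trim_blanks_py
  exact trim_main text
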